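-- pv_equiv track=rewrite | github.com/hulkdesignQ/graphrag-orchestration | tests/unit/test_focused_text.py | focused_text_OLD
-- ===== SOURCE A (Python) =====
-- def focused_text_OLD(sentence_texts, full_text, entity_names_lower):
--     """OLD approach: Python substring matching with 30 entity names."""
--     if not sentence_texts or not entity_names_lower:
--         return full_text
--
--     hit_indices = set()
--     for i, sent in enumerate(sentence_texts):
--         sent_l = sent.lower()
--         for en in entity_names_lower:
--             if en in sent_l:
--                 hit_indices.add(i)
--                 break
--
--     if not hit_indices:
--         return full_text
--
--     ranges = []
--     for idx in sorted(hit_indices):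
--         lo = max(0, idx - 1)
--         hi = min(len(sentence_texts), idx + 2)
--         if ranges and lo <= ranges[-1][1]:
--             ranges[-1] = (ranges[-1][0], hi)
--         else:
--             ranges.append((lo, hi))
--
--     windows = []
--     for lo, hi in ranges:
--         windows.append(" ".join(sentence_texts[lo:hi]))
--     return " [...] ".join(windows)
-- ===== SOURCE B (Python) =====
-- def focused_text_OLD(sentence_texts, full_text, entity_names_lower):
--     """Mask-and-scan rewrite: mark hit sentences, widen the hit mask by one
--     sentence on each side, then emit the maximal runs of kept sentences."""
--     if not sentence_texts or not entity_names_lower: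
--         return full_text
--     hit = []
--     for s in sentence_texts:
--         sl = s.lower()
--         found = False
--         for en in entity_names_lower:
--             if en in sl:
--                 found = True
--                 break
--         hit.append(found)
--     if True not in hit:
--         return full_text
--     keep = [a or b or c for a, b, c in zip([False] + hit, hit, hit[1:] + [False])]
--     windows = []
--     cur = []
--     for s, k in zip(sentence_texts, keep):
--         if k:
--             cur.append(s)
--         elif cur:
--             windows.append(" ".join(cur))
--             cur = []
--     if cur:
--         windows.append(" ".join(cur))
--     return " [...] ".join(windows)
-- ===== Notes on version B (the rewrite author's own statement) =====
-- stated objective: alternative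
-- what changed: Instead of collecting hit indices into a set, sorting them, merging per-hit [i-1,i+2) ranges in a fold and re-slicing the sentence list per range, B computes a per-sentence hit mask, widens it by one sentence on each side via a zip with its two shifts, and emits the maximal runs of kept sentences in a single linear scan.
import Mathlib
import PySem

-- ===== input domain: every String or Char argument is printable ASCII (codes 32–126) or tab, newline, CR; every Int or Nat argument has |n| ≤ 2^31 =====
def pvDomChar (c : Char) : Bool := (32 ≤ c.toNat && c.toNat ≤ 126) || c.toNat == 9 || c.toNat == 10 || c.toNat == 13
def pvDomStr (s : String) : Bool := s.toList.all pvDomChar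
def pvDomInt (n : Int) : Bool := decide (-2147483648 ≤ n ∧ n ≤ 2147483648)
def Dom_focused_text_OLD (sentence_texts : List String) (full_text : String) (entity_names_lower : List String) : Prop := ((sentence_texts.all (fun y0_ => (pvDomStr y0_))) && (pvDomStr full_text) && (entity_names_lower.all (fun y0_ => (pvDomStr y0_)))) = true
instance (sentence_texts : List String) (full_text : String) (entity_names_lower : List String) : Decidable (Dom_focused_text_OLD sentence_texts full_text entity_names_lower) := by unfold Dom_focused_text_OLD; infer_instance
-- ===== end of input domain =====

-- B re-implements A's window selection as a widened hit mask scanned once for maximal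
-- runs (instead of a sorted hit-index set with interval merging and re-slicing); same cost,
-- alternative algorithm; equal output proved on the whole domain.

-- ===== PORT A =====
-- A-side helper: the body of A's range-merging loop (ranges[-1] mutation done on a cons cell)
def pvAStep (n : Int) (rs : List (Int × Int)) (idx : Int) : List (Int × Int) :=
  let lo := max 0 (idx - 1)
  let hi := min n (idx + 2)
  match rs with
  | (plo, phi) :: rest => if lo ≤ phi then (plo, hi) :: rest else (lo, hi) :: (plo, phi) :: rest
  | [] => [(lo, hi)]

def focused_text_OLD (sentence_texts : List String) (full_text : String) (entity_names_lower : List String) : String :=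
  if sentence_texts.isEmpty || entity_names_lower.isEmpty then full_text
  else
    let hit_indices : PySem.Set Int :=
      (PySem.List.enumerate sentence_texts 0).foldl (fun s p =>
        let sent_l := PySem.Str.lower p.2
        if entity_names_lower.any (fun en => PySem.Str.isIn en sent_l) then PySem.Set.add s p.1 else s)
        PySem.Set.empty
    if hit_indices.isEmpty then full_text
    else
      let sortedHits := PySem.List.sorted hit_indices (fun x => x)
      let rangesRev : List (Int × Int) :=
        sortedHits.foldl (pvAStep (PySem.List.len sentence_texts)) []
      let windows := rangesRev.reverse.map (fun r =>
        PySem.Str.join " " (PySem.List.slice sentence_texts (some r.1) (some r.2)))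
      PySem.Str.join " [...] " windows

-- ===== PORT B =====
-- B (alternative decomposition, same cost): widen the per-sentence hit mask by one
-- sentence on each side and emit maximal runs of kept sentences in one scan,
-- instead of merging per-hit index ranges.
def focused_text_OLD_alt (sentence_texts : List String) (full_text : String) (entity_names_lower : List String) : String :=
  if sentence_texts.isEmpty || entity_names_lower.isEmpty then full_text
  else
    let hit : List Bool := sentence_texts.foldl (fun acc s =>
      acc ++ [entity_names_lower.any (fun en => PySem.Str.isIn en (PySem.Str.lower s))]) []
    if !(hit.contains true) then full_text
    else
      let keep : List Bool := (((false :: hit).zip hit).zip (hit.tail ++ [false])).map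
        (fun p => p.1.1 || p.1.2 || p.2)
      let st := (sentence_texts.zip keep).foldl
        (fun (acc : List String × List String) p =>
          if p.2 then (acc.1, acc.2 ++ [p.1])
          else if acc.2.isEmpty then acc
          else (acc.1 ++ [PySem.Str.join " " acc.2], ([] : List String)))
        ([], [])
      let windows := if st.2.isEmpty then st.1 else st.1 ++ [PySem.Str.join " " st.2]
      PySem.Str.join " [...] " windows

-- ===== PRECONDITION & SPEC =====
def Spec_focused_text_OLD (sentence_texts : List String) (full_text : String) (entity_names_lower : List String) (out : String) : Prop := out = focused_text_OLD_alt sentence_texts full_text entity_names_lower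
instance (sentence_texts : List String) (full_text : String) (entity_names_lower : List String) (out : String) : Decidable (Spec_focused_text_OLD sentence_texts full_text entity_names_lower out) := by unfold Spec_focused_text_OLD; infer_instance

-- ===== CLAIM (what is proved, stated in full; the proofs are below) =====
def Claim_equal_focused_text_OLD : Prop := ∀ (sentence_texts : List String) (full_text : String) (entity_names_lower : List String), Dom_focused_text_OLD sentence_texts full_text entity_names_lower → Spec_focused_text_OLD sentence_texts full_text entity_names_lower (focused_text_OLD sentence_texts full_text entity_names_lower)

-- ===== LEMMAS AND PROOFS =====

-- indices (0-based) of the true entries of a Bool list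
def pvTrueIdx : List Bool → List Nat
  | [] => []
  | b :: t => (if b then [0] else []) ++ (pvTrueIdx t).map (· + 1)

-- A's interval merge, in open-range form: state = current open range [lo, e)
def pvMergeGo (n : Nat) : List Nat → Nat → Nat → List (Nat × Nat)
  | [], lo, e => [(lo, e)]
  | h :: t, lo, e =>
    if h - 1 ≤ e then pvMergeGo n t lo (min n (h + 2))
    else (lo, e) :: pvMergeGo n t (h - 1) (min n (h + 2))

-- B's keep mask: each entry or'ed with its neighbours (prev = entry before the list)
def pvWiden : List Bool → Bool → List Bool
  | [], _ => []
  | b :: t, prev => (prev || b || t.headD false) :: pvWiden t b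

-- B's run grouping as a plain recursion
def pvWgo : List (String × Bool) → List String → List String
  | [], cur => if cur.isEmpty then [] else [PySem.Str.join " " cur]
  | (s, k) :: rest, cur =>
    if k then pvWgo rest (cur ++ [s])
    else if cur.isEmpty then pvWgo rest []
    else PySem.Str.join " " cur :: pvWgo rest []

lemma pvTrueIdx_mem (l : List Bool) (k : Nat) :
    k ∈ pvTrueIdx l ↔ k < l.length ∧ l.getD k false = true := by
  induction l generalizing k with
  | nil => simp [pvTrueIdx]
  | cons b t ih =>
    cases k with
    | zero =>
      cases b <;> simp [pvTrueIdx]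
    | succ k =>
      cases b <;> simp [pvTrueIdx, ih]

lemma pvTrueIdx_pairwise (l : List Bool) : (pvTrueIdx l).Pairwise (· < ·) := by
  induction l with
  | nil => exact List.Pairwise.nil
  | cons b t ih =>
    have hm : ((pvTrueIdx t).map (· + 1)).Pairwise (· < ·) :=
      ih.map _ (fun a b h => by omega)
    cases b with
    | false => simpa [pvTrueIdx] using hm
    | true =>
      simp only [pvTrueIdx, if_true, List.singleton_append]
      refine List.Pairwise.cons ?_ hm
      intro y hy
      simp only [List.mem_map] at hy
      omega

lemma pvTrueIdx_nil_iff (l : List Bool) : pvTrueIdx l = [] ↔ l.contains true = false := by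
  induction l with
  | nil => simp [pvTrueIdx]
  | cons b t ih =>
    cases b <;> simp [pvTrueIdx, ih]

lemma pvFoldEnum {α : Type} (q : α → Bool) :
    ∀ (xs : List α) (s : List Int) (start : Int), (∀ x ∈ s, x < start) →
    (PySem.List.enumerate xs start).foldl
        (fun s p => if q p.2 then PySem.Set.add s p.1 else s) s
      = s ++ (pvTrueIdx (xs.map q)).map (fun k : Nat => start + (k : Int)) := by
  intro xs
  induction xs with
  | nil => intro s start _; simp [pvTrueIdx]
  | cons x xs ih =>
    intro s start hs
    have hmm : List.map (fun k : Nat => start + 1 + (k : Int)) (pvTrueIdx (xs.map q))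
        = List.map (fun k : Nat => start + (k : Int)) ((pvTrueIdx (xs.map q)).map (· + 1)) := by
      rw [List.map_map]
      apply List.map_congr_left
      intro a _
      simp only [Function.comp_apply]
      push_cast
      ring
    rw [PySem.List.enumerate_cons]
    simp only [List.foldl_cons, List.map_cons]
    by_cases hx : q x
    · have hadd : (if q x then PySem.Set.add s start else s) = s ++ [start] := by
        rw [if_pos hx, PySem.Set.add_of_not_mem (fun hmem => by have := hs _ hmem; omega)]
      rw [hadd, ih (s ++ [start]) (start + 1)
        (by intro y hy; rcases List.mem_append.mp hy with h | h
            · have := hs _ h; omega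
            · simp only [List.mem_singleton] at h; omega), hmm, hx]
      simp only [pvTrueIdx, if_true, List.singleton_append, List.map_cons,
        Nat.cast_zero, add_zero, List.append_assoc, List.singleton_append]
    · rw [Bool.not_eq_true] at hx
      rw [if_neg (by simp [hx]), ih s (start + 1) (by intro y hy; have := hs _ hy; omega),
        hmm, hx]
      simp only [pvTrueIdx, Bool.false_eq_true, if_false, List.nil_append]

lemma pvAStep_cons (n plo phi idx : Int) (rest : List (Int × Int)) :
    pvAStep n ((plo, phi) :: rest) idx
      = if max 0 (idx - 1) ≤ phi then (plo, min n (idx + 2)) :: rest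
        else (max 0 (idx - 1), min n (idx + 2)) :: (plo, phi) :: rest := rfl

lemma pvAStep_nil (n idx : Int) :
    pvAStep n [] idx = [(max 0 (idx - 1), min n (idx + 2))] := rfl

lemma pvFoldMerge (n : Nat) :
    ∀ (t : List Nat) (lo e : Nat) (rs : List (Int × Int)),
    ((t.map (fun k : Nat => (k : Int))).foldl (pvAStep ((n : Nat) : Int))
      ((((lo : Nat) : Int), ((e : Nat) : Int)) :: rs)).reverse
      = rs.reverse ++ (pvMergeGo n t lo e).map (fun r => (((r.1 : Nat) : Int), ((r.2 : Nat) : Int))) := by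
  intro t
  induction t with
  | nil => intro lo e rs; simp [pvMergeGo]
  | cons h t ih =>
    intro lo e rs
    have hmax : max 0 ((h : Int) - 1) = ((h - 1 : Nat) : Int) := by omega
    have hmin : min ((n : Nat) : Int) ((h : Int) + 2) = ((min n (h + 2) : Nat) : Int) := by omega
    rw [List.map_cons, List.foldl_cons, pvAStep_cons, hmax, hmin]
    by_cases hc : h - 1 ≤ e
    · rw [if_pos (by exact_mod_cast hc), ih lo (min n (h + 2)) rs, pvMergeGo, if_pos hc]
    · rw [if_neg (by exact_mod_cast hc),
        ih (h - 1) (min n (h + 2)) ((((lo : Nat) : Int), ((e : Nat) : Int)) :: rs),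
        pvMergeGo, if_neg hc]
      simp [List.append_assoc]

lemma pvFoldMerge0 (n : Nat) (h1 : Nat) (t : List Nat) :
    (((h1 :: t).map (fun k : Nat => (k : Int))).foldl (pvAStep ((n : Nat) : Int)) []).reverse
      = (pvMergeGo n t (h1 - 1) (min n (h1 + 2))).map
          (fun r => (((r.1 : Nat) : Int), ((r.2 : Nat) : Int))) := by
  rw [List.map_cons, List.foldl_cons, pvAStep_nil]
  have hmax : max 0 ((h1 : Int) - 1) = ((h1 - 1 : Nat) : Int) := by omega
  have hmin : min ((n : Nat) : Int) ((h1 : Int) + 2) = ((min n (h1 + 2) : Nat) : Int) := by omega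
  rw [hmax, hmin]
  have h4 := pvFoldMerge n t (h1 - 1) (min n (h1 + 2)) []
  rw [List.reverse_nil, List.nil_append] at h4
  exact h4

lemma pvWiden_length (l : List Bool) (prev : Bool) : (pvWiden l prev).length = l.length := by
  induction l generalizing prev with
  | nil => rfl
  | cons b t ih => simp [pvWiden, ih]

lemma pvKeep_eq_widen :
    ∀ (hit : List Bool) (prev : Bool),
    (((prev :: hit).zip hit).zip (hit.tail ++ [false])).map (fun p => p.1.1 || p.1.2 || p.2)
      = pvWiden hit prev := by
  intro hit
  induction hit with
  | nil => intro prev; rfl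
  | cons b t ih =>
    intro prev
    cases t with
    | nil => rfl
    | cons c t' =>
      have h2 := ih b
      simp only [List.tail_cons] at h2 ⊢
      simp only [List.zip_cons_cons] at h2
      simp only [List.cons_append, List.zip_cons_cons, List.map_cons]
      rw [pvWiden, List.headD_cons, h2]

lemma pvWiden_getD :
    ∀ (l : List Bool) (prev : Bool) (i : Nat), i < l.length →
    (pvWiden l prev).getD i false
      = ((if i = 0 then prev else l.getD (i - 1) false) || l.getD i false || l.getD (i + 1) false) := by
  intro l
  induction l with
  | nil => intro prev i h; simp at h
  | cons b t ih =>
    intro prev i hi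
    cases i with
    | zero =>
      show (prev || b || t.headD false) = _
      cases t <;> simp
    | succ i =>
      show (pvWiden t b).getD i false = _
      rw [ih b i (by simpa using hi)]
      cases i with
      | zero => simp
      | succ j => simp

lemma pvBFold :
    ∀ (l : List (String × Bool)) (ws cur : List String),
    (let st := l.foldl
        (fun (acc : List String × List String) p =>
          if p.2 then (acc.1, acc.2 ++ [p.1])
          else if acc.2.isEmpty then acc
          else (acc.1 ++ [PySem.Str.join " " acc.2], ([] : List String)))
        (ws, cur);
      if st.2.isEmpty then st.1 else st.1 ++ [PySem.Str.join " " st.2])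
      = ws ++ pvWgo l cur := by
  intro l
  induction l with
  | nil =>
    intro ws cur
    rw [pvWgo]
    cases hc : cur.isEmpty <;> simp [hc]
  | cons p l ih =>
    intro ws cur
    obtain ⟨s, k⟩ := p
    simp only [List.foldl_cons]
    cases k with
    | true =>
      have := ih ws (cur ++ [s])
      rw [pvWgo, if_pos rfl]
      simpa using this
    | false =>
      rw [pvWgo]
      simp only [Bool.false_eq_true, if_false]
      cases hc : cur.isEmpty with
      | true =>
        have hcur : cur = [] := by simpa [List.isEmpty_iff] using hc
        subst hcur
        have := ih ws []
        simpa using this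
      | false =>
        have := ih (ws ++ [PySem.Str.join " " cur]) []
        simp only [hc] at *
        simp only [Bool.false_eq_true, if_false, List.append_assoc,
          List.singleton_append] at this ⊢
        simpa using this

lemma pvW_true :
    ∀ (m : Nat) (ss : List String) (ks : List Bool) (cur : List String), m ≤ ss.length →
    pvWgo (ss.zip (List.replicate m true ++ ks)) cur
      = pvWgo ((ss.drop m).zip ks) (cur ++ ss.take m) := by
  intro m
  induction m with
  | zero => intro ss ks cur _; simp
  | succ m ih =>
    intro ss ks cur hm
    cases ss with
    | nil => simp at hm
    | cons s ss =>
      simp only [List.replicate_succ, List.cons_append, List.zip_cons_cons,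
        List.drop_succ_cons, List.take_succ_cons]
      rw [pvWgo, if_pos rfl, ih ss ks (cur ++ [s]) (by simpa using hm)]
      simp [List.append_assoc]

lemma pvW_false_skip :
    ∀ (m : Nat) (ss : List String) (ks : List Bool), m ≤ ss.length →
    pvWgo (ss.zip (List.replicate m false ++ ks)) [] = pvWgo ((ss.drop m).zip ks) [] := by
  intro m
  induction m with
  | zero => intro ss ks _; simp
  | succ m ih =>
    intro ss ks hm
    cases ss with
    | nil => simp at hm
    | cons s ss =>
      simp only [List.replicate_succ, List.cons_append, List.zip_cons_cons,
        List.drop_succ_cons]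
      rw [pvWgo]
      simp only [Bool.false_eq_true, if_false, List.isEmpty_nil]
      exact ih ss ks (by simpa using hm)

lemma pvW_false_emit (m : Nat) (ss : List String) (ks : List Bool) (cur : List String)
    (h1 : 1 ≤ m) (h2 : m ≤ ss.length) (hc : cur ≠ []) :
    pvWgo (ss.zip (List.replicate m false ++ ks)) cur
      = PySem.Str.join " " cur :: pvWgo ((ss.drop m).zip ks) [] := by
  cases m with
  | zero => omega
  | succ m =>
    cases ss with
    | nil => simp at h2
    | cons s ss =>
      simp only [List.replicate_succ, List.cons_append, List.zip_cons_cons,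
        List.drop_succ_cons]
      rw [pvWgo]
      simp only [Bool.false_eq_true, if_false]
      rw [if_neg (by simpa [List.isEmpty_iff] using hc)]
      rw [pvW_false_skip m ss ks (by simpa using h2)]

lemma pvDropSeg {l : List Bool} (p q : Nat) (b : Bool) (hpq : p ≤ q) (hq : q ≤ l.length)
    (h : ∀ i, p ≤ i → i < q → l.getD i false = b) :
    l.drop p = List.replicate (q - p) b ++ l.drop q := by
  apply List.ext_getElem
  · simp only [List.length_drop, List.length_append, List.length_replicate]
    omega
  · intro i h1 h2
    rw [List.getElem_drop]
    by_cases hi : i < q - p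
    · rw [List.getElem_append_left (by simpa using hi), List.getElem_replicate]
      have hg := h (p + i) (by omega) (by omega)
      rwa [List.getD_eq_getElem _ _ (by simp at h1; omega)] at hg
    · rw [List.getElem_append_right (by simpa using hi)]
      simp only [List.length_replicate, List.getElem_drop]
      have : q + (i - (q - p)) = p + i := by omega
      simp [this]

lemma pvSegAppend {α : Type} (xs : List α) (a b c : Nat) (hab : a ≤ b) (hbc : b ≤ c) :
    (xs.drop a).take (b - a) ++ (xs.drop b).take (c - b) = (xs.drop a).take (c - a) := by
  have h1 : c - a = (b - a) + (c - b) := by omega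
  rw [h1, List.take_add, List.drop_drop]
  have h2 : a + (b - a) = b := by omega
  rw [h2]

lemma pvCore (sts : List String) (keepL : List Bool) (n : Nat)
    (hn : sts.length = n) (hk : keepL.length = n) :
    ∀ (hs : List Nat) (lo e p : Nat),
    lo ≤ p → p ≤ e → e ≤ n → lo < e →
    hs.Pairwise (· < ·) →
    (∀ h ∈ hs, h < n ∧ e ≤ h + 1) →
    (∀ i, p ≤ i → i < n → (keepL.getD i false = true ↔ (i < e ∨ ∃ h ∈ hs, h - 1 ≤ i ∧ i ≤ h + 1))) →
    pvWgo ((sts.drop p).zip (keepL.drop p)) ((sts.drop lo).take (p - lo))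
      = (pvMergeGo n hs lo e).map (fun r => PySem.Str.join " " ((sts.drop r.1).take (r.2 - r.1))) := by
  have hcne : ∀ a b : Nat, a < b → b ≤ n → (sts.drop a).take (b - a) ≠ [] := by
    intro a b hab hbn hnil
    have hlen := congrArg List.length hnil
    simp only [List.length_take, List.length_drop, hn, List.length_nil] at hlen
    omega
  intro hs
  induction hs with
  | nil =>
    intro lo e p hlp hpe hen hloe _ _ hspec
    have hd1 : keepL.drop p = List.replicate (e - p) true ++ keepL.drop e := by
      refine pvDropSeg p e true hpe (by omega) ?_
      intro i h1 h2
      exact (hspec i h1 (by omega)).mpr (Or.inl h2)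
    have hd2 : keepL.drop e = List.replicate (n - e) false := by
      have h3 : keepL.drop e = List.replicate (n - e) false ++ keepL.drop n := by
        refine pvDropSeg e n false hen (by omega) ?_
        intro i h1 h2
        cases hgd : keepL.getD i false with
        | false => rfl
        | true =>
          have h4 := (hspec i (by omega) h2).mp hgd
          simp only [List.not_mem_nil, false_and, exists_false, or_false] at h4
          omega
      have h4 : keepL.drop n = [] := by rw [← hk]; exact List.drop_length
      simpa [h4] using h3
    rw [hd1, pvW_true (e - p) _ _ _ (by simp [hn]; omega), List.drop_drop,
      show p + (e - p) = e from by omega, pvSegAppend sts lo p e hlp hpe, hd2]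
    by_cases hne : e = n
    · subst hne
      have hdn : sts.drop e = [] := by rw [← hn]; exact List.drop_length
      rw [hdn, show e - e = 0 from by omega]
      simp only [List.replicate_zero, List.zip_nil_left, pvWgo]
      rw [if_neg (by simpa [List.isEmpty_iff] using hcne lo e hloe (le_refl e))]
      simp [pvMergeGo]
    · rw [show List.replicate (n - e) false = List.replicate (n - e) false ++ [] from
        (List.append_nil _).symm,
        pvW_false_emit (n - e) (sts.drop e) [] _ (by omega) (by simp [hn])
          (hcne lo e hloe hen)]
      simp [pvMergeGo, pvWgo]
  | cons h t ih =>
    intro lo e p hlp hpe hen hloe hpw hall hspec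
    obtain ⟨hhn, hhe⟩ := hall h (by simp)
    rw [List.pairwise_cons] at hpw
    obtain ⟨hlt', hpw'⟩ := hpw
    have hee' : e ≤ min n (h + 2) := by omega
    by_cases hme : h - 1 ≤ e
    · rw [pvMergeGo, if_pos hme]
      refine ih lo (min n (h + 2)) p hlp (by omega) (by omega) (by omega) hpw' ?_ ?_
      · intro h' hh'
        obtain ⟨a, b⟩ := hall h' (List.mem_cons_of_mem _ hh')
        have := hlt' h' hh'
        exact ⟨a, by omega⟩
      · intro i hpi hin
        rw [hspec i hpi hin]
        constructor
        · rintro (hlt | ⟨h', hh', hc1, hc2⟩)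
          · exact Or.inl (by omega)
          · rcases List.mem_cons.mp hh' with rfl | hmem
            · exact Or.inl (by omega)
            · exact Or.inr ⟨h', hmem, hc1, hc2⟩
        · rintro (hlt | ⟨h', hmem, hc1, hc2⟩)
          · by_cases hie : i < e
            · exact Or.inl hie
            · exact Or.inr ⟨h, by simp, by omega, by omega⟩
          · exact Or.inr ⟨h', List.mem_cons_of_mem _ hmem, hc1, hc2⟩
    · have hgap : e < h - 1 := by omega
      rw [pvMergeGo, if_neg hme]
      have hd1 : keepL.drop p = List.replicate (e - p) true ++ keepL.drop e := by
        refine pvDropSeg p e true hpe (by omega) ?_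
        intro i h1 h2
        exact (hspec i h1 (by omega)).mpr (Or.inl h2)
      have hd2 : keepL.drop e = List.replicate (h - 1 - e) false ++ keepL.drop (h - 1) := by
        refine pvDropSeg e (h - 1) false (by omega) (by omega) ?_
        intro i h1 h2
        cases hgd : keepL.getD i false with
        | false => rfl
        | true =>
          have h4 := (hspec i (by omega) (by omega)).mp hgd
          rcases h4 with h4 | ⟨h', hm, c1, c2⟩
          · omega
          · rcases List.mem_cons.mp hm with rfl | hmem
            · omega
            · have := hlt' h' hmem; omega
      rw [hd1, pvW_true (e - p) _ _ _ (by simp [hn]; omega), List.drop_drop,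
        show p + (e - p) = e from by omega, pvSegAppend sts lo p e hlp hpe, hd2,
        pvW_false_emit (h - 1 - e) (sts.drop e) _ _ (by omega) (by simp [hn]; omega)
          (hcne lo e hloe hen),
        List.drop_drop, show e + (h - 1 - e) = h - 1 from by omega]
      have hih := ih (h - 1) (min n (h + 2)) (h - 1) (le_refl _) (by omega) (by omega)
        (by omega) hpw' ?_ ?_
      · rw [List.map_cons]
        simp only [Nat.sub_self, List.take_zero] at hih
        rw [hih]
      · intro h' hh'
        obtain ⟨a, b⟩ := hall h' (List.mem_cons_of_mem _ hh')
        have := hlt' h' hh'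
        exact ⟨a, by omega⟩
      · intro i hpi hin
        rw [hspec i (by omega) hin]
        constructor
        · rintro (hlt | ⟨h', hh', hc1, hc2⟩)
          · omega
          · rcases List.mem_cons.mp hh' with rfl | hmem
            · exact Or.inl (by omega)
            · exact Or.inr ⟨h', hmem, hc1, hc2⟩
        · rintro (hlt | ⟨h', hmem, hc1, hc2⟩)
          · exact Or.inr ⟨h, by simp, by omega, by omega⟩
          · exact Or.inr ⟨h', List.mem_cons_of_mem _ hmem, hc1, hc2⟩

-- keep-mask characterisation: a sentence is kept iff some hit index is within distance 1
lemma pvKeepSpec (mask : List Bool) (i : Nat) (hi : i < mask.length) :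
    ((pvWiden mask false).getD i false = true
      ↔ ∃ h ∈ pvTrueIdx mask, h - 1 ≤ i ∧ i ≤ h + 1) := by
  have hbound : ∀ j, mask.getD j false = true → j < mask.length := by
    intro j hj
    by_contra hc
    rw [List.getD_eq_default _ _ (by omega)] at hj
    exact absurd hj (by simp)
  rw [pvWiden_getD mask false i hi]
  constructor
  · intro hor
    simp only [Bool.or_eq_true] at hor
    rcases hor with hor1 | hp
    · rcases hor1 with hif | hm
      · by_cases hi0 : i = 0
        · rw [if_pos hi0] at hif; exact absurd hif (by simp)
        · rw [if_neg hi0] at hif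
          exact ⟨i - 1, (pvTrueIdx_mem _ _).mpr ⟨hbound _ hif, hif⟩, by omega, by omega⟩
      · exact ⟨i, (pvTrueIdx_mem _ _).mpr ⟨hbound _ hm, hm⟩, by omega, by omega⟩
    · exact ⟨i + 1, (pvTrueIdx_mem _ _).mpr ⟨hbound _ hp, hp⟩, by omega, by omega⟩
  · rintro ⟨h, hm, c1, c2⟩
    obtain ⟨hlt, hval⟩ := (pvTrueIdx_mem _ _).mp hm
    have h3 : h + 1 = i ∨ h = i ∨ h = i + 1 := by omega
    rcases h3 with h3 | h3 | h3
    · have hne : i ≠ 0 := by omega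
      rw [if_neg hne, show i - 1 = h from by omega, hval]
      simp
    · rw [h3] at hval
      rw [hval]
      simp
    · rw [← h3, hval]
      simp

-- ===== VERDICT (by name: the statement is the Claim_ definition above) =====
theorem focused_text_OLD_spec : Claim_equal_focused_text_OLD := by
  intro sts ft ens _
  unfold Spec_focused_text_OLD focused_text_OLD focused_text_OLD_alt
  by_cases h0 : (sts.isEmpty || ens.isEmpty) = true
  · rw [if_pos h0, if_pos h0]
  · rw [if_neg h0, if_neg h0]
    have hA : (PySem.List.enumerate sts 0).foldl
        (fun s p => if (ens.any fun en => PySem.Str.isIn en (PySem.Str.lower p.2)) = true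
          then PySem.Set.add s p.1 else s) PySem.Set.empty
        = (pvTrueIdx (sts.map (fun s => ens.any fun en => PySem.Str.isIn en (PySem.Str.lower s)))).map
            (fun k : Nat => ((0 : Int) + (k : Int))) := by
      have h1 := pvFoldEnum (fun s => ens.any fun en => PySem.Str.isIn en (PySem.Str.lower s))
        sts [] 0 (by simp)
      rw [List.nil_append] at h1
      exact h1
    have hA2 : (pvTrueIdx (sts.map (fun s => ens.any fun en => PySem.Str.isIn en (PySem.Str.lower s)))).map
          (fun k : Nat => ((0 : Int) + (k : Int)))
        = (pvTrueIdx (sts.map (fun s => ens.any fun en => PySem.Str.isIn en (PySem.Str.lower s)))).map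
          (fun k : Nat => (k : Int)) :=
      List.map_congr_left (fun a _ => by omega)
    have hHit : sts.foldl (fun acc s =>
        acc ++ [ens.any (fun en => PySem.Str.isIn en (PySem.Str.lower s))]) []
        = sts.map (fun s => ens.any fun en => PySem.Str.isIn en (PySem.Str.lower s)) := by
      rw [PySem.List.foldl_append_singleton_eq_map, List.nil_append]
    simp only [hA, hA2, hHit, PySem.List.len_eq]
    by_cases hnil : pvTrueIdx (sts.map (fun s => ens.any fun en => PySem.Str.isIn en (PySem.Str.lower s))) = []
    · have hc := (pvTrueIdx_nil_iff _).mp hnil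
      rw [hnil, hc]
      rfl
    · obtain ⟨h1, t, hht⟩ : ∃ h1 t,
          pvTrueIdx (sts.map (fun s => ens.any fun en => PySem.Str.isIn en (PySem.Str.lower s))) = h1 :: t := by
        cases hx : pvTrueIdx (sts.map (fun s => ens.any fun en => PySem.Str.isIn en (PySem.Str.lower s)))
        · exact absurd hx hnil
        · exact ⟨_, _, rfl⟩
      have hcont : (sts.map (fun s => ens.any fun en => PySem.Str.isIn en (PySem.Str.lower s))).contains true = true := by
        cases hx : (sts.map (fun s => ens.any fun en => PySem.Str.isIn en (PySem.Str.lower s))).contains true with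
        | true => rfl
        | false => exact absurd ((pvTrueIdx_nil_iff _).mpr hx) hnil
      rw [hht, pvKeep_eq_widen]
      rw [if_neg (by simp : ¬((((h1 :: t).map (fun k : Nat => (k : Int))).isEmpty) = true)),
        if_neg (by rw [hcont]; simp :
          ¬((!((sts.map (fun s => ens.any fun en => PySem.Str.isIn en (PySem.Str.lower s))).contains true)) = true))]
      -- abbreviations (proof-local)
      have hpair := pvTrueIdx_pairwise (sts.map (fun s => ens.any fun en => PySem.Str.isIn en (PySem.Str.lower s)))
      rw [hht, List.pairwise_cons] at hpair
      obtain ⟨hgt, hpw'⟩ := hpair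
      have hmemAll : ∀ h' ∈ pvTrueIdx (sts.map (fun s => ens.any fun en => PySem.Str.isIn en (PySem.Str.lower s))),
          h' < sts.length := by
        intro h' hh'
        have := ((pvTrueIdx_mem _ _).mp hh').1
        simpa using this
      have hh1n : h1 < sts.length := hmemAll h1 (by rw [hht]; exact List.mem_cons_self ..)
      -- A side: sorted is the identity here
      have hsorted : PySem.List.sorted ((h1 :: t).map (fun k : Nat => (k : Int))) (fun x => x)
          = (h1 :: t).map (fun k : Nat => (k : Int)) := by
        refine PySem.List.sorted_eq_of_perm_of_pairwise_lt _ _ _ (List.Perm.refl _) ?_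
        refine List.Pairwise.map _ (fun a b h => ?_) (hht ▸ pvTrueIdx_pairwise _)
        exact_mod_cast h
      rw [hsorted]
      -- B side: run grouping
      have hkeepLen : (pvWiden (sts.map (fun s => ens.any fun en => PySem.Str.isIn en (PySem.Str.lower s))) false).length
          = sts.length := by
        rw [pvWiden_length, List.length_map]
      have hBF := pvBFold
        (sts.zip (pvWiden (sts.map (fun s => ens.any fun en => PySem.Str.isIn en (PySem.Str.lower s))) false)) [] []
      simp only [List.nil_append] at hBF
      rw [hBF]
      -- skip the all-false prefix before the first hit
      have hseg : (pvWiden (sts.map (fun s => ens.any fun en => PySem.Str.isIn en (PySem.Str.lower s))) false).drop 0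
          = List.replicate (h1 - 1 - 0) false
            ++ (pvWiden (sts.map (fun s => ens.any fun en => PySem.Str.isIn en (PySem.Str.lower s))) false).drop (h1 - 1) := by
        refine pvDropSeg 0 (h1 - 1) false (Nat.zero_le _) (by omega) ?_
        intro i h1i h2i
        cases hgd : (pvWiden (sts.map (fun s => ens.any fun en => PySem.Str.isIn en (PySem.Str.lower s))) false).getD i false with
        | false => rfl
        | true =>
          obtain ⟨h', hm, c1, c2⟩ := (pvKeepSpec _ i (by simp; omega)).mp hgd
          rw [hht] at hm
          rcases List.mem_cons.mp hm with rfl | hmem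
          · omega
          · have := hgt h' hmem; omega
      rw [List.drop_zero, Nat.sub_zero] at hseg
      rw [hseg, pvW_false_skip (h1 - 1) sts _ (by omega)]
      -- the core equivalence
      have hco := pvCore sts
        (pvWiden (sts.map (fun s => ens.any fun en => PySem.Str.isIn en (PySem.Str.lower s))) false)
        sts.length rfl hkeepLen t (h1 - 1) (min sts.length (h1 + 2)) (h1 - 1)
        (le_refl _) (by omega) (by omega) (by omega) hpw'
        (fun h' hh' => ⟨hmemAll h' (by rw [hht]; exact List.mem_cons_of_mem _ hh'),
          by have := hgt h' hh'; omega⟩)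
        (by
          intro i hpi hin
          rw [pvKeepSpec _ i (by simpa using hin), hht]
          constructor
          · rintro ⟨h', hm, c1, c2⟩
            rcases List.mem_cons.mp hm with rfl | hmem
            · exact Or.inl (by omega)
            · exact Or.inr ⟨h', hmem, c1, c2⟩
          · rintro (hlt | ⟨h', hmem, c1, c2⟩)
            · exact ⟨h1, List.mem_cons_self .., by omega, by omega⟩
            · exact ⟨h', List.mem_cons_of_mem _ hmem, c1, c2⟩)
      rw [Nat.sub_self, List.take_zero] at hco
      rw [hco]
      -- A side: evaluate the merge fold
      rw [pvFoldMerge0 sts.length h1 t, List.map_map]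
      refine congrArg (PySem.Str.join " [...] ") ?_
      refine List.map_congr_left ?_
      rintro ⟨a, b⟩ _
      simp only [Function.comp_apply]
      rw [PySem.List.slice_natCast]
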